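-- pv_equiv track=rewrite | github.com/andpop-mrsu/202M_Testing_Magicheva_KS | Task01/triangle_func.py | get_triangle_type
-- ===== SOURCE A (Python) =====
-- class IncorrectTriangleSides(Exception):
--     """Исключение для некорректных сторон треугольника."""
--     pass
--
-- def get_triangle_type(a, b, c):
--     """
--     Определяет тип треугольника по его сторонам.
--     """
--     if any(side <= 0 for side in [a, b, c]) or (a + b <= c or a + c <= b or b + c <= a):
--         raise IncorrectTriangleSides("Некорректные стороны треугольника")
--
--     if a == b == c:
--         return "equilateral"
--     elif a == b or b == c or a == c:
--         return "isosceles"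
--     else:
--         return "nonequilateral"
-- ===== SOURCE B (Python) =====
-- class IncorrectTriangleSides(Exception):
--     """Исключение для некорректных сторон треугольника."""
--     pass
--
-- def get_triangle_type(a, b, c):
--     x, y, z = sorted([a, b, c])
--     if x <= 0 or x + y <= z:
--         raise IncorrectTriangleSides("Некорректные стороны треугольника")
--     return ["equilateral", "isosceles", "nonequilateral"][(x < y) + (y < z)]
-- ===== Notes on version B (the rewrite author's own statement) =====
-- stated objective: alternative
-- what changed: Sorts the three sides, validates only the minimal guard (smallest side positive, two smaller sides exceed the largest) and classifies by indexing with the number of strict adjacent inequalities in the sorted triple, instead of A's pairwise-equality if/elif chain over unsorted sides.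
import Mathlib
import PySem

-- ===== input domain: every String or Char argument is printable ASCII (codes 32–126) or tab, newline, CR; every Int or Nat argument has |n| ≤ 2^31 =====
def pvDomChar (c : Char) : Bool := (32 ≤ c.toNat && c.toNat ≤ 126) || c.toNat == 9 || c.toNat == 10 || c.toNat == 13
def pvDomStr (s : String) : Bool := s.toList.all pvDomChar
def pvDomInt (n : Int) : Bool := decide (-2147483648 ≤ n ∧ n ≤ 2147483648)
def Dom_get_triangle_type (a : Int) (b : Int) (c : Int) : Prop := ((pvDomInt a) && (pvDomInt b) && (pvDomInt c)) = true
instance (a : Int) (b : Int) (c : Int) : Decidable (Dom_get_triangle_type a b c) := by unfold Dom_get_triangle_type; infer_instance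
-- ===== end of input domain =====

-- B sorts the three sides and classifies by indexing with the number of strict adjacent inequalities in the sorted triple (alternative algorithm).


-- ===== PORT A =====
-- Port of A: (the raising guard is excluded by Pre_), then the pairwise-equality if/elif chain.
def get_triangle_type (a : Int) (b : Int) (c : Int) : String :=
  if a = b ∧ b = c then "equilateral"
  else if a = b ∨ b = c ∨ a = c then "isosceles"
  else "nonequilateral"

-- ===== PORT B =====
-- Port of B: sort the triple (the raising guard is excluded by Pre_), then index the name table
-- by the count of strict adjacent inequalities in the sorted triple.
def get_triangle_type_alt (a : Int) (b : Int) (c : Int) : String :=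
  match PySem.List.sorted [a, b, c] (fun v => v) false with
  | [x, y, z] =>
      (PySem.List.pyGet? ["equilateral", "isosceles", "nonequilateral"]
        ((if x < y then 1 else 0) + (if y < z then 1 else 0))).getD ""
  | _ => ""

-- ===== PRECONDITION & SPEC =====
-- Pre_ excludes exactly the inputs where A raises IncorrectTriangleSides (a nonpositive side or a
-- failed triangle inequality); B raises there too.
def Pre_get_triangle_type (a : Int) (b : Int) (c : Int) : Prop :=
  0 < a ∧ 0 < b ∧ 0 < c ∧ c < a + b ∧ b < a + c ∧ a < b + c
instance (a : Int) (b : Int) (c : Int) : Decidable (Pre_get_triangle_type a b c) := by unfold Pre_get_triangle_type; infer_instance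
def pvWitness_get_triangle_type : Int × Int × Int := (3, 4, 5)
def Spec_get_triangle_type (a : Int) (b : Int) (c : Int) (out : String) : Prop := out = get_triangle_type_alt a b c
instance (a : Int) (b : Int) (c : Int) (out : String) : Decidable (Spec_get_triangle_type a b c out) := by unfold Spec_get_triangle_type; infer_instance

-- ===== CLAIM =====
def Claim_equal_get_triangle_type : Prop := ∀ (a : Int) (b : Int) (c : Int), Dom_get_triangle_type a b c → Pre_get_triangle_type a b c → Spec_get_triangle_type a b c (get_triangle_type a b c)

-- ===== LEMMAS AND PROOFS =====
-- Names the result of sorting a 3-element list: any ordered rearrangement is the sorted list.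
theorem pv_sorted3 (a b c x y z : Int) (hp : List.Perm [x, y, z] [a, b, c])
    (h1 : x ≤ y) (h2 : y ≤ z) :
    PySem.List.sorted [a, b, c] (fun v => v) false = [x, y, z] :=
  PySem.List.sorted_id_eq_of_perm_of_pairwise _ _ hp (by simp [h1, h2]; omega)

-- A's chain agrees with B's table lookup once the sorted triple is ordered x ≤ y ≤ z and is the
-- arguments in some order; stated for each of the six orderings via the same leaf tactic.
theorem pv_leaf (a b c x y z : Int) (hx : x ≤ y) (hy : y ≤ z)
    (hs : PySem.List.sorted [a, b, c] (fun v => v) false = [x, y, z])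
    (hmul : (a = b ∧ b = c ↔ x = y ∧ y = z) ∧ ((a = b ∨ b = c ∨ a = c) ↔ (x = y ∨ y = z ∨ x = z))) :
    get_triangle_type a b c = get_triangle_type_alt a b c := by
  unfold get_triangle_type get_triangle_type_alt
  rw [hs]
  norm_num [PySem.List.pyGet?, PySem.List.pyIdx?]
  obtain ⟨h3, h4⟩ := hmul
  split_ifs <;> first | rfl | omega

-- ===== VERDICT =====
theorem get_triangle_type_spec : Claim_equal_get_triangle_type := by
  intro a b c _ _
  unfold Spec_get_triangle_type
  rcases le_total a b with hab | hab
  · rcases le_total b c with hbc | hbc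
    · exact pv_leaf a b c a b c hab hbc (pv_sorted3 a b c a b c (List.Perm.refl _) hab hbc)
        ⟨Iff.rfl, by tauto⟩
    · rcases le_total a c with hac | hac
      · exact pv_leaf a b c a c b hac hbc
          (pv_sorted3 a b c a c b (List.Perm.cons a (List.Perm.swap b c [])) hac hbc)
          ⟨by omega, by tauto⟩
      · exact pv_leaf a b c c a b hac hab
          (pv_sorted3 a b c c a b
            ((List.Perm.swap a c [b]).trans (List.Perm.cons a (List.Perm.swap b c []))) hac hab)
          ⟨by omega, by tauto⟩
  · rcases le_total a c with hac | hac
    · exact pv_leaf a b c b a c hab hac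
        (pv_sorted3 a b c b a c (List.Perm.swap a b [c]) hab hac)
        ⟨by omega, by tauto⟩
    · rcases le_total b c with hbc | hbc
      · exact pv_leaf a b c b c a hbc hac
          (pv_sorted3 a b c b c a
            ((List.Perm.cons b (List.Perm.swap a c [])).trans (List.Perm.swap a b [c])) hbc hac)
          ⟨by omega, by tauto⟩
      · exact pv_leaf a b c c b a hbc hab
          (pv_sorted3 a b c c b a
            (((List.Perm.swap b c [a]).trans (List.Perm.cons b (List.Perm.swap a c []))).trans
              (List.Perm.swap a b [c])) hbc hab)
          ⟨by omega, by tauto⟩
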